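-- pv_equiv track=rewrite | github.com/Vovleras/MCI | DinamicaPrueba2.py | maxEsfuerzo
-- ===== SOURCE A (Python) =====
-- def maxEsfuerzo(esfuerzo, matrizE):
--   cant=0
--   maxE=0
--   for i in matrizE:
--     if(i<= esfuerzo and i>maxE):
--       maxE=i
--       cant+=1
--
--   return(cant)
-- ===== SOURCE B (Python) =====
-- def _prefix_max(seed, xs):
--     ms = [seed]
--     cur = seed
--     for x in xs:
--         cur = max(cur, x)
--         ms.append(cur)
--     return ms
--
-- def maxEsfuerzo(esfuerzo, matrizE):
--     xs = [x for x in matrizE if x <= esfuerzo]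
--     ms = _prefix_max(0, xs)
--     return sum(1 for a, b in zip(ms, ms[1:]) if a < b)
-- ===== Notes on version B (the rewrite author's own statement) =====
-- stated objective: alternative
-- what changed: Instead of A's single scan with an inline counter and running-max state, B first filters out elements above the threshold, builds the explicit prefix-maximum sequence seeded at 0, and then counts strict increases between adjacent entries in a separate pass.
import Mathlib
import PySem

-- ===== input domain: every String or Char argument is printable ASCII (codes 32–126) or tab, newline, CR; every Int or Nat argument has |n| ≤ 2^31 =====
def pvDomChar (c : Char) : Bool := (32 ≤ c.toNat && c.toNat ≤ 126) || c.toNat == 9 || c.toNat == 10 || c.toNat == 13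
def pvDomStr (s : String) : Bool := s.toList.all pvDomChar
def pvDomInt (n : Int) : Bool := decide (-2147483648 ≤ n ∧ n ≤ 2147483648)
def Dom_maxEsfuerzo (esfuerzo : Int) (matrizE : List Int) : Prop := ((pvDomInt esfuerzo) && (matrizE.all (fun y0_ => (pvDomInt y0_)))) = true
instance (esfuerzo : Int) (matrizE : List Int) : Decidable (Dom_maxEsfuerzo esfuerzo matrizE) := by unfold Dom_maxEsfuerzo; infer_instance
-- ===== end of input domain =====

-- B: same count, different decomposition — filter, explicit prefix-max sequence, then count rises.

-- ===== PORT A =====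
-- the for-loop over matrizE with state (cant, maxE)
def maxELoop (esfuerzo : Int) : List Int → Int × Int → Int × Int
  | [], s => s
  | i :: rest, (cant, maxE) =>
      maxELoop esfuerzo rest (if i ≤ esfuerzo ∧ maxE < i then (cant + 1, i) else (cant, maxE))

def maxEsfuerzo (esfuerzo : Int) (matrizE : List Int) : Int :=
  (maxELoop esfuerzo matrizE (0, 0)).1

-- ===== PORT B =====
-- the loop of _prefix_max: state is (ms reversed, cur); the append becomes a cons on the
-- reversed accumulator, undone by one reverse at the end
def prefixMaxLoop : List Int → List Int → Int → List Int
  | [], msRev, _ => msRev.reverse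
  | x :: rest, msRev, cur => prefixMaxLoop rest (max cur x :: msRev) (max cur x)

-- _prefix_max(seed, xs)
def prefixMax (seed : Int) (xs : List Int) : List Int :=
  prefixMaxLoop xs [seed] seed

def maxEsfuerzo_alt (esfuerzo : Int) (matrizE : List Int) : Int :=
  let xs := matrizE.filter (fun x => x ≤ esfuerzo)
  let ms := prefixMax 0 xs
  (((ms.zip (ms.drop 1)).filter (fun p => p.1 < p.2)).length : Int)

-- ===== PRECONDITION & SPEC =====
def Spec_maxEsfuerzo (esfuerzo : Int) (matrizE : List Int) (out : Int) : Prop := out = maxEsfuerzo_alt esfuerzo matrizE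
instance (esfuerzo : Int) (matrizE : List Int) (out : Int) : Decidable (Spec_maxEsfuerzo esfuerzo matrizE out) := by unfold Spec_maxEsfuerzo; infer_instance

-- ===== CLAIM (what is proved, stated in full; the proofs are below) =====
def Claim_equal_maxEsfuerzo : Prop := ∀ (esfuerzo : Int) (matrizE : List Int), Dom_maxEsfuerzo esfuerzo matrizE → Spec_maxEsfuerzo esfuerzo matrizE (maxEsfuerzo esfuerzo matrizE)

-- ===== LEMMAS AND PROOFS =====

-- recursive (head-first) characterisation of the prefix-max sequence, for the proofs only
def pmRec (seed : Int) : List Int → List Int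
  | [] => [seed]
  | x :: rest => seed :: pmRec (max seed x) rest

lemma pmRec_head (seed : Int) (xs : List Int) :
    ∃ t, pmRec seed xs = seed :: t := by
  cases xs with
  | nil => exact ⟨[], rfl⟩
  | cons x rest => exact ⟨pmRec (max seed x) rest, rfl⟩

lemma prefixMaxLoop_eq (xs : List Int) :
    ∀ msRev cur, prefixMaxLoop xs msRev cur = msRev.reverse ++ (pmRec cur xs).tail := by
  induction xs with
  | nil => intro msRev cur; simp [prefixMaxLoop, pmRec]
  | cons x rest ih =>
    intro msRev cur
    obtain ⟨t, ht⟩ := pmRec_head (max cur x) rest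
    simp [prefixMaxLoop, ih, pmRec, ht]

lemma prefixMax_eq_pmRec (seed : Int) (xs : List Int) :
    prefixMax seed xs = pmRec seed xs := by
  obtain ⟨t, ht⟩ := pmRec_head seed xs
  rw [prefixMax, prefixMaxLoop_eq, ht]
  simp

-- number of strict rises between adjacent entries, as B counts them
def countRises (ms : List Int) : Int :=
  (((ms.zip (ms.drop 1)).filter (fun p => p.1 < p.2)).length : Int)

lemma countRises_cons (m : Int) (x : Int) (f : List Int) :
    countRises (pmRec m (x :: f)) =
      (if m < x then 1 else 0) + countRises (pmRec (max m x) f) := by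
  obtain ⟨t, ht⟩ := pmRec_head (max m x) f
  show countRises (m :: pmRec (max m x) f) = _
  rw [ht]
  simp only [countRises, List.drop_succ_cons, List.drop_zero, List.zip_cons_cons,
    List.filter_cons]
  by_cases h : m < x
  · have : m < max m x := lt_max_of_lt_right h
    simp only [this, h, decide_true, if_true, List.length_cons]
    push_cast
    omega
  · have : ¬ m < max m x := by
      simp only [lt_max_iff, lt_self_iff_false, false_or]
      exact h
    simp [this, h]

lemma maxELoop_count (esfuerzo : Int) (xs : List Int) :
    ∀ c m, (maxELoop esfuerzo xs (c, m)).1 =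
      c + countRises (pmRec m (xs.filter (fun x => x ≤ esfuerzo))) := by
  induction xs with
  | nil => intro c m; simp [maxELoop, countRises, pmRec]
  | cons x rest ih =>
    intro c m
    have step : maxELoop esfuerzo (x :: rest) (c, m) =
        maxELoop esfuerzo rest (if x ≤ esfuerzo ∧ m < x then (c + 1, x) else (c, m)) := rfl
    by_cases hx : x ≤ esfuerzo
    · rw [List.filter_cons_of_pos (by simpa using hx), countRises_cons]
      by_cases hm : m < x
      · have hmax : max m x = x := max_eq_right hm.le
        rw [step, if_pos ⟨hx, hm⟩, ih, hmax, if_pos hm]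
        ring
      · have hmax : max m x = m := max_eq_left (le_of_not_gt hm)
        rw [step, if_neg (by tauto : ¬ (x ≤ esfuerzo ∧ m < x)), ih, hmax, if_neg hm]
        ring
    · rw [List.filter_cons_of_neg (by simpa using hx), step,
        if_neg (by tauto : ¬ (x ≤ esfuerzo ∧ m < x))]
      exact ih c m

-- ===== VERDICT (by name: the statement is the Claim_ definition above) =====
theorem maxEsfuerzo_spec : Claim_equal_maxEsfuerzo := by
  intro esfuerzo matrizE _
  show maxEsfuerzo esfuerzo matrizE = maxEsfuerzo_alt esfuerzo matrizE
  rw [maxEsfuerzo, maxELoop_count]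
  simp [maxEsfuerzo_alt, prefixMax_eq_pmRec, countRises]
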